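-- pv_equiv track=rewrite | github.com/HeathenToaster/code | VIGOR_Functions.py | bin_seq
-- ===== SOURCE A (Python) =====
-- def get_block(t_0):
--     if 0 <= t_0 <= 300:
--         block = 0
--     elif 300 < t_0 <= 600:
--         block = 1
--     elif 600 < t_0 <= 900:
--         block = 2
--     elif 900 < t_0 <= 1200:
--         block = 3
--     elif 1200 < t_0 <= 1500:
--         block = 4
--     elif 1500 < t_0 <= 1800:
--         block = 5
--     elif 1800 < t_0 <= 2100:
--         block = 6
--     elif 2100 < t_0 <= 2400:
--         block = 7
--     elif 2400 < t_0 <= 2700: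
--         block = 8
--     elif 2700 < t_0 <= 3000:
--         block = 9
--     elif 3000 < t_0 <= 3300:
--         block = 10
--     elif 3300 < t_0 <= 3600:
--         block = 11
--     elif 0 > t_0:
--         block = None
--     return block
--
-- def bin_seq(seq):
--     # cut the full sequence in blocks
--     prevblock = 0
--     index = 0
--     binseq = {k:{} for k in [_ for _ in range(0,12)]}
--     for i in range(0, len(seq)):
--         if get_block(seq[i][0]) != prevblock: index = i  # if change block (next block) store action# to reset first action of next block to 0
--         binseq[get_block(seq[i][0])][i-index] = seq[i]
--         prevblock = get_block(seq[i][0])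
--     return binseq
-- ===== SOURCE B (Python) =====
-- # Same binning, different decomposition: split the sequence into maximal
-- # runs of consecutive equal blocks, then fill each run into binseq with a fresh 0-based counter.
-- def get_block(t_0):
--     if 0 <= t_0 <= 300:
--         block = 0
--     elif 300 < t_0 <= 600:
--         block = 1
--     elif 600 < t_0 <= 900:
--         block = 2
--     elif 900 < t_0 <= 1200:
--         block = 3
--     elif 1200 < t_0 <= 1500:
--         block = 4
--     elif 1500 < t_0 <= 1800:
--         block = 5
--     elif 1800 < t_0 <= 2100:
--         block = 6
--     elif 2100 < t_0 <= 2400: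
--         block = 7
--     elif 2400 < t_0 <= 2700:
--         block = 8
--     elif 2700 < t_0 <= 3000:
--         block = 9
--     elif 3000 < t_0 <= 3300:
--         block = 10
--     elif 3300 < t_0 <= 3600:
--         block = 11
--     elif 0 > t_0:
--         block = None
--     return block
--
-- def split_runs(seq):
--     # maximal runs of consecutive elements sharing the same block, built in one pass
--     runs = []
--     for item in seq:
--         b = get_block(item[0])
--         if runs and runs[-1][0] == b:
--             runs[-1][1].append(item)
--         else:
--             runs.append((b, [item]))
--     return runs
--
-- def bin_seq(seq):
--     binseq = {k: {} for k in range(12)}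
--     for b, items in split_runs(seq):
--         pos = 0
--         for item in items:
--             binseq[b][pos] = item
--             pos += 1
--     return binseq
-- ===== Notes on version B (the rewrite author's own statement) =====
-- stated objective: alternative
-- what changed: B replaces A's single stateful loop (prevblock/index bookkeeping) by a two-phase decomposition: recursively split the sequence into maximal runs of consecutive equal blocks, then fill each run into binseq with a fresh 0-based counter.
import Mathlib
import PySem

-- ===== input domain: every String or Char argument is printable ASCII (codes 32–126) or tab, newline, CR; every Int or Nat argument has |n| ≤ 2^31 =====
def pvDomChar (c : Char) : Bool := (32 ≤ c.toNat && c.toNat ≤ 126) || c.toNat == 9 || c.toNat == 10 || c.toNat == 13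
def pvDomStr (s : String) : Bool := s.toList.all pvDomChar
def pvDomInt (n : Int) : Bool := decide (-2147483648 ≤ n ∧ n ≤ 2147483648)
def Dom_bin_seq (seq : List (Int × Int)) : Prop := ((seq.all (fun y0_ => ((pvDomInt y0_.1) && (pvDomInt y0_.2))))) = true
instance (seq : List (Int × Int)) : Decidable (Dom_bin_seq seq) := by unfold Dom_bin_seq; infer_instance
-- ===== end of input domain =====

-- B splits the sequence into maximal runs of consecutive equal blocks first, then fills
-- each run with a fresh 0-based counter (different decomposition; return value equal to A's on Pre_).

-- shared module helper get_block; 'none' covers t_0 < 0 (Python returns None) and t_0 > 3600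
-- (Python raises UnboundLocalError) — both kinds of timestamps are excluded by Pre_bin_seq.
def getBlock (t0 : Int) : Option Int :=
  if 0 ≤ t0 ∧ t0 ≤ 300 then some 0
  else if 300 < t0 ∧ t0 ≤ 600 then some 1
  else if 600 < t0 ∧ t0 ≤ 900 then some 2
  else if 900 < t0 ∧ t0 ≤ 1200 then some 3
  else if 1200 < t0 ∧ t0 ≤ 1500 then some 4
  else if 1500 < t0 ∧ t0 ≤ 1800 then some 5
  else if 1800 < t0 ∧ t0 ≤ 2100 then some 6
  else if 2100 < t0 ∧ t0 ≤ 2400 then some 7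
  else if 2400 < t0 ∧ t0 ≤ 2700 then some 8
  else if 2700 < t0 ∧ t0 ≤ 3000 then some 9
  else if 3000 < t0 ∧ t0 ≤ 3300 then some 10
  else if 3300 < t0 ∧ t0 ≤ 3600 then some 11
  else none

abbrev BinDict := PySem.Dict Int (PySem.Dict Int (Int × Int))

-- binseq[b][k] = v : on b = none (Python binseq[None]) or a key not in binseq, Python raises
-- KeyError — those inputs are outside Pre_bin_seq; there the port leaves the dict unchanged.
def setItem (d : BinDict) (b : Option Int) (k : Int) (v : Int × Int) : BinDict :=
  match b with
  | none => d
  | some blk =>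
    match d.get? blk with
    | none => d
    | some inner => d.insert blk (inner.insert k v)

-- binseq = {k: {} for k in range(12)}
def initBins : BinDict :=
  (PySem.List.pyRange 0 12 1).foldl (fun d k => d.insert k PySem.Dict.empty) PySem.Dict.empty

-- ===== PORT A =====
-- for i in range(len(seq)): reset index on block change, insert at i - index
def loopA : List (Int × Int) → Option Int → Int → Int → BinDict → BinDict
  | [], _, _, _, binseq => binseq
  | x :: rest, prevblock, i, index, binseq =>
    let b := getBlock x.1
    let index' := if b ≠ prevblock then i else index
    loopA rest b (i + 1) index' (setItem binseq b (i - index') x)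

def bin_seq (seq : List (Int × Int)) : List (Int × List (Int × Int × Int)) :=
  (loopA seq (some 0) 0 0 initBins).items.map (fun p => (p.1, p.2.items))

-- ===== PORT B =====
-- split_runs' loop: 'runs' is kept REVERSED (newest run first) and each run's item list
-- reversed (Python appends in place at the end); splitRuns restores the Python order.
def stepRun (acc : List (Option Int × List (Int × Int))) (x : Int × Int) :
    List (Option Int × List (Int × Int)) :=
  let b := getBlock x.1
  match acc with
  | (b', ys) :: rest => if b' = b then (b', x :: ys) :: rest else (b, [x]) :: (b', ys) :: rest
  | [] => [(b, [x])]

def splitRuns (seq : List (Int × Int)) : List (Option Int × List (Int × Int)) :=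
  ((seq.foldl stepRun []).map (fun p => (p.1, p.2.reverse))).reverse

-- the inner 'for item in items' loop with its pos counter
def fillRun : BinDict → Option Int → Int → List (Int × Int) → BinDict
  | d, _, _, [] => d
  | d, b, pos, it :: its => fillRun (setItem d b pos it) b (pos + 1) its

-- the outer 'for b, items in split_runs(seq)' loop
def fillRuns : BinDict → List (Option Int × List (Int × Int)) → BinDict
  | d, [] => d
  | d, (b, items) :: rest => fillRuns (fillRun d b 0 items) rest

def bin_seq_alt (seq : List (Int × Int)) : List (Int × List (Int × Int × Int)) :=
  (fillRuns initBins (splitRuns seq)).items.map (fun p => (p.1, p.2.items))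

-- ===== PRECONDITION & SPEC =====
-- Pre_ excludes exactly the timestamps on which Python A raises: t > 3600 (UnboundLocalError
-- in get_block) and t < 0 (get_block returns None, then binseq[None] raises KeyError).
def Pre_bin_seq (seq : List (Int × Int)) : Prop := ∀ p ∈ seq, 0 ≤ p.1 ∧ p.1 ≤ 3600
instance (seq : List (Int × Int)) : Decidable (Pre_bin_seq seq) := by unfold Pre_bin_seq; infer_instance

def pvWitness_bin_seq : (List (Int × Int)) := [(0, 1), (400, 2), (350, 3)]

def Spec_bin_seq (seq : List (Int × Int)) (out : List (Int × List (Int × Int × Int))) : Prop := out = bin_seq_alt seq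
instance (seq : List (Int × Int)) (out : List (Int × List (Int × Int × Int))) : Decidable (Spec_bin_seq seq out) := by unfold Spec_bin_seq; infer_instance

-- ===== CLAIM (what is proved, stated in full; the proofs are below) =====
def Claim_equal_bin_seq : Prop := ∀ (seq : List (Int × Int)), Dom_bin_seq seq → Pre_bin_seq seq → Spec_bin_seq seq (bin_seq seq)

-- ===== LEMMAS AND PROOFS =====
-- what B finally fills from a (reversed) run accumulator
def fillAcc (acc : List (Option Int × List (Int × Int))) : BinDict :=
  fillRuns initBins ((acc.map (fun p => (p.1, p.2.reverse))).reverse)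

lemma fillRuns_append (r1 r2 : List (Option Int × List (Int × Int))) : ∀ d,
    fillRuns d (r1 ++ r2) = fillRuns (fillRuns d r1) r2 := by
  induction r1 with
  | nil => intro d; simp [fillRuns]
  | cons r rs ih => intro d; obtain ⟨b, items⟩ := r; simp [fillRuns, ih]

lemma fillRun_append (its : List (Int × Int)) (x : Int × Int) (b : Option Int) : ∀ (d : BinDict) (p : Int),
    fillRun d b p (its ++ [x]) = setItem (fillRun d b p its) b (p + its.length) x := by
  induction its with
  | nil => intro d p; simp [fillRun]
  | cons it its ih =>
    intro d p
    simp only [List.cons_append, fillRun, ih, List.length_cons]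
    congr 1
    push_cast
    ring

-- fillAcc after one stepRun = one more setItem, at the position A's loop uses
lemma fillAcc_step (acc : List (Option Int × List (Int × Int))) (x : Int × Int) :
    fillAcc (stepRun acc x) =
      match acc with
      | [] => setItem (fillAcc []) (getBlock x.1) 0 x
      | (b, ys) :: _ =>
          if b = getBlock x.1 then setItem (fillAcc acc) b (ys.length) x
          else setItem (fillAcc acc) (getBlock x.1) 0 x := by
  cases acc with
  | nil => simp [stepRun, fillAcc, fillRuns, fillRun]
  | cons r rest =>
    obtain ⟨b, ys⟩ := r
    by_cases hb : b = getBlock x.1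
    · subst hb
      simp [stepRun, fillAcc, fillRuns_append, fillRuns, fillRun_append]
    · simp [stepRun, hb, fillAcc, fillRuns_append, fillRuns, fillRun]

-- the loop invariant: A's (prevblock, index) bookkeeping against B's newest run
lemma loopA_eq_fill (l : List (Int × Int)) : ∀ (acc : List (Option Int × List (Int × Int)))
    (prev : Option Int) (i idx : Int),
    (match acc with
     | [] => prev = some 0 ∧ i = idx
     | (b, ys) :: _ => prev = b ∧ i - idx = ys.length) →
    loopA l prev i idx (fillAcc acc) = fillAcc (l.foldl stepRun acc) := by
  induction l with
  | nil => intro acc prev i idx _; simp [loopA]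
  | cons x xs ih =>
    intro acc prev i idx hinv
    simp only [loopA, List.foldl_cons]
    cases acc with
    | nil =>
      obtain ⟨hp, hi⟩ := hinv
      have hidx : (i - if getBlock x.1 ≠ prev then i else idx) = 0 := by
        by_cases h : getBlock x.1 = prev <;> simp [h, hi]
      have h0 : fillAcc (stepRun [] x) = setItem (fillAcc []) (getBlock x.1) 0 x := by
        simpa using fillAcc_step [] x
      rw [hidx, ← h0, show stepRun [] x = [(getBlock x.1, [x])] from by simp [stepRun]]
      exact ih [(getBlock x.1, [x])] (getBlock x.1) (i + 1)
        (if getBlock x.1 ≠ prev then i else idx)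
        ⟨rfl, by by_cases h : getBlock x.1 = prev <;> simp [h, hi]⟩
    | cons r rest =>
      obtain ⟨b, ys⟩ := r
      obtain ⟨hp, hlen⟩ := hinv
      subst hp
      by_cases hb : getBlock x.1 = prev
      · subst hb
        have hidx : (i - if getBlock x.1 ≠ getBlock x.1 then i else idx) = (ys.length : Int) := by
          simp [hlen]
        have h0 : fillAcc (stepRun ((getBlock x.1, ys) :: rest) x)
            = setItem (fillAcc ((getBlock x.1, ys) :: rest)) (getBlock x.1) (ys.length) x := by
          simpa using fillAcc_step ((getBlock x.1, ys) :: rest) x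
        have hstep : stepRun ((getBlock x.1, ys) :: rest) x = (getBlock x.1, x :: ys) :: rest := by
          simp [stepRun]
        rw [hidx, ← h0, hstep]
        exact ih ((getBlock x.1, x :: ys) :: rest) (getBlock x.1) (i + 1)
          (if getBlock x.1 ≠ getBlock x.1 then i else idx)
          ⟨rfl, by simp; omega⟩
      · have hb' : ¬ prev = getBlock x.1 := fun h => hb h.symm
        have hidx : (i - if getBlock x.1 ≠ prev then i else idx) = 0 := by simp [hb]
        have h0 : fillAcc (stepRun ((prev, ys) :: rest) x)
            = setItem (fillAcc ((prev, ys) :: rest)) (getBlock x.1) 0 x := by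
          simpa [hb'] using fillAcc_step ((prev, ys) :: rest) x
        have hstep : stepRun ((prev, ys) :: rest) x
            = (getBlock x.1, [x]) :: (prev, ys) :: rest := by
          simp [stepRun, hb']
        rw [hidx, ← h0, hstep]
        exact ih ((getBlock x.1, [x]) :: (prev, ys) :: rest) (getBlock x.1) (i + 1)
          (if getBlock x.1 ≠ prev then i else idx)
          ⟨rfl, by simp [hb]⟩

-- ===== VERDICT (by name: the statement is the Claim_ definition above) =====
theorem bin_seq_spec : Claim_equal_bin_seq := by
  intro seq _ _
  unfold Spec_bin_seq bin_seq bin_seq_alt splitRuns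
  rw [show initBins = fillAcc [] by simp [fillAcc, fillRuns]]
  rw [loopA_eq_fill seq [] (some 0) 0 0 ⟨rfl, rfl⟩]
  rfl
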